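-- pv_equiv track=rewrite | github.com/RobinKa/jaxga | src/jaxga/jaxga.py | get_normal_ordered
-- ===== SOURCE A (Python) =====
-- def _normal_swap(x):
--     for i in range(len(x) - 1):
--         a, b = x[i], x[i + 1]
--         if a > b:
--             x[i], x[i+1] = b, a
--             return False, x
--     return True, x
--
-- def get_normal_ordered(blade_name):
--     blade_name = list(blade_name)
--     sign = -1
--     done = False
--     while not done:
--         sign *= -1
--         done, blade_name = _normal_swap(blade_name)
--     return sign, tuple(blade_name)
-- ===== SOURCE B (Python) =====
-- def get_normal_ordered(blade_name):
--     def sort_count(x):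
--         # merge sort counting inversions
--         if len(x) < 2:
--             return 0, x
--         m = len(x) // 2
--         ci, left = sort_count(x[:m])
--         cj, right = sort_count(x[m:])
--         inv = ci + cj
--         merged = []
--         i = j = 0
--         while i < len(left) and j < len(right):
--             if left[i] <= right[j]:
--                 merged.append(left[i]); i += 1
--             else:
--                 inv += len(left) - i
--                 merged.append(right[j]); j += 1
--         merged.extend(left[i:]); merged.extend(right[j:])
--         return inv, merged
--     inv, out = sort_count(list(blade_name))
--     return (1 if inv % 2 == 0 else -1), tuple(out)
-- ===== Notes on version B (the rewrite author's own statement) =====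
-- stated objective: faster
-- what changed: A repeatedly rescans the list from the front performing one adjacent swap per pass ('bubble sort with restart', one pass per inversion); B does a single merge sort that counts inversions and derives the sign from their parity.
import Mathlib
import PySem

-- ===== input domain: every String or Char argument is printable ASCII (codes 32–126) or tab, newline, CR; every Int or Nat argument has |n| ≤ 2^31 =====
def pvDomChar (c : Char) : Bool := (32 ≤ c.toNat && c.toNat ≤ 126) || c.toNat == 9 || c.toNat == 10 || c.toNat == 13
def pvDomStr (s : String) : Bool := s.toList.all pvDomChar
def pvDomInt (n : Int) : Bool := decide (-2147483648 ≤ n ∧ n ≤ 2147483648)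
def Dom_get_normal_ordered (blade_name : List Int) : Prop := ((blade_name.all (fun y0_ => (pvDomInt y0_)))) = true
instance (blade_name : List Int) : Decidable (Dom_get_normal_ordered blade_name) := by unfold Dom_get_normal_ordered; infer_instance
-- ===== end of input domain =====

-- B replaces A's restart-from-the-front single-swap bubble passes by one merge sort
-- that counts inversions (sign = parity of inversions): objective 'faster'.

-- ===== PORT A =====
-- _normal_swap: scan for the first adjacent out-of-order pair, swap it and stop
def normalSwap : List Int → Bool × List Int
  | [] => (true, [])
  | [a] => (true, [a])
  | a :: b :: t =>
    if b < a then (false, b :: a :: t)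
    else
      let r := normalSwap (b :: t)
      (r.1, a :: r.2)

-- the 'while not done' loop; the fuel (length² + 1) only makes it total: the loop
-- runs exactly (#inversions + 1) times, proved below to be within the fuel
def nsLoop : Nat → Int → List Int → Int × List Int
  | 0, s, x => (s, x)
  | f + 1, s, x =>
    let r := normalSwap x
    if r.1 then (-s, r.2) else nsLoop f (-s) r.2

def get_normal_ordered (blade_name : List Int) : Int × List Int :=
  nsLoop (blade_name.length * blade_name.length + 1) (-1) blade_name

-- ===== PORT B =====
-- the merge loop of Source B's sort_count: the i/j index walk becomes structural recursion
def mergeCnt : List Int → List Int → Nat × List Int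
  | [], r => (0, r)
  | a :: l, [] => (0, a :: l)
  | a :: l, b :: r =>
    if a ≤ b then
      let m := mergeCnt l (b :: r)
      (m.1, a :: m.2)
    else
      let m := mergeCnt (a :: l) r
      (m.1 + (l.length + 1), b :: m.2)

def sortCnt (x : List Int) : Nat × List Int :=
  if _h : x.length < 2 then (0, x)
  else
    let m := x.length / 2
    let lc := sortCnt (x.take m)
    let rc := sortCnt (x.drop m)
    let mg := mergeCnt lc.2 rc.2
    (lc.1 + rc.1 + mg.1, mg.2)
termination_by x.length
decreasing_by
  · simp [List.length_take]; omega
  · simp [List.length_drop]; omega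

def get_normal_ordered_alt (blade_name : List Int) : Int × List Int :=
  let r := sortCnt blade_name
  ((if r.1 % 2 == 0 then (1 : Int) else -1), r.2)

-- ===== PRECONDITION & SPEC =====
def Spec_get_normal_ordered (blade_name : List Int) (out : Int × List Int) : Prop := out = get_normal_ordered_alt blade_name
instance (blade_name : List Int) (out : Int × List Int) : Decidable (Spec_get_normal_ordered blade_name out) := by unfold Spec_get_normal_ordered; infer_instance

-- ===== CLAIM (what is proved, stated in full; the proofs are below) =====
def Claim_equal_get_normal_ordered : Prop := ∀ (blade_name : List Int), Dom_get_normal_ordered blade_name → Spec_get_normal_ordered blade_name (get_normal_ordered blade_name)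

-- ===== LEMMAS AND PROOFS =====

-- number of inversions (pairs i < j with x[i] > x[j])
def invCnt : List Int → Nat
  | [] => 0
  | a :: l => l.countP (fun b => decide (b < a)) + invCnt l

-- cross inversions between a left and a right block
def crossCnt (l r : List Int) : Nat :=
  (l.map (fun a => r.countP (fun b => decide (b < a)))).sum

theorem crossCnt_cons_left (a : Int) (l r : List Int) :
    crossCnt (a :: l) r = r.countP (fun b => decide (b < a)) + crossCnt l r := by
  simp [crossCnt]

theorem crossCnt_cons_right (l : List Int) (b : Int) (r : List Int) :
    crossCnt l (b :: r) = l.countP (fun a => decide (b < a)) + crossCnt l r := by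
  induction l with
  | nil => simp [crossCnt]
  | cons c l ih =>
    simp only [crossCnt_cons_left, ih, List.countP_cons]
    by_cases h : b < c <;> simp [h] <;> omega

theorem invCnt_append (l r : List Int) :
    invCnt (l ++ r) = invCnt l + invCnt r + crossCnt l r := by
  induction l with
  | nil => simp [invCnt, crossCnt]
  | cons a l ih =>
    simp only [List.cons_append, invCnt, ih, crossCnt_cons_left, List.countP_append]
    omega

theorem crossCnt_perm_left {l l' : List Int} (r : List Int) (h : l.Perm l') :
    crossCnt l r = crossCnt l' r :=
  (h.map _).sum_eq

theorem crossCnt_perm_right (l : List Int) {r r' : List Int} (h : r.Perm r') :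
    crossCnt l r = crossCnt l r' := by
  unfold crossCnt
  congr 1
  exact List.map_congr_left (fun a _ => h.countP_eq _)

theorem sorted_invCnt {x : List Int} (h : x.Pairwise (· ≤ ·)) : invCnt x = 0 := by
  induction x with
  | nil => rfl
  | cons a l ih =>
    rw [List.pairwise_cons] at h
    have hz : l.countP (fun b => decide (b < a)) = 0 := by
      rw [List.countP_eq_zero]
      intro b hb
      simpa using not_lt.mpr (h.1 b hb)
    simp [invCnt, hz, ih h.2]

theorem mergeCnt_spec : ∀ (l r : List Int), l.Pairwise (· ≤ ·) → r.Pairwise (· ≤ ·) →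
    (mergeCnt l r).1 = crossCnt l r ∧ (mergeCnt l r).2.Pairwise (· ≤ ·) ∧
      (mergeCnt l r).2.Perm (l ++ r) := by
  intro l r
  induction l, r using mergeCnt.induct with
  | case1 r => intro _ hr; simp [mergeCnt, crossCnt, hr]
  | case2 a l => intro hl _; simp [mergeCnt, crossCnt, hl]
  | case3 a l b r hab ih =>
    intro hl hr
    obtain ⟨h1, h2, h3⟩ := ih (List.pairwise_cons.mp hl).2 hr
    have hlow : ∀ c ∈ l ++ b :: r, a ≤ c := by
      intro c hc
      rcases List.mem_append.mp hc with hcl | hcr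
      · exact (List.pairwise_cons.mp hl).1 c hcl
      · rcases List.mem_cons.mp hcr with rfl | hcr
        · exact hab
        · exact hab.trans ((List.pairwise_cons.mp hr).1 c hcr)
    simp only [mergeCnt, if_pos hab]
    refine ⟨?_, ?_, h3.cons a⟩
    · have hz : (b :: r).countP (fun c => decide (c < a)) = 0 := by
        rw [List.countP_eq_zero]
        intro c hc
        simpa using not_lt.mpr (hlow c (List.mem_append.mpr (Or.inr hc)))
      rw [crossCnt_cons_left, h1, hz]
      omega
    · exact List.pairwise_cons.mpr ⟨fun c hc => hlow c (h3.subset hc), h2⟩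
  | case4 a l b r hab ih =>
    intro hl hr
    obtain ⟨h1, h2, h3⟩ := ih hl (List.pairwise_cons.mp hr).2
    have hba : b < a := lt_of_not_ge hab
    have hgt : ∀ c ∈ a :: l, b < c := by
      intro c hc
      rcases List.mem_cons.mp hc with rfl | hc
      · exact hba
      · exact hba.trans_le ((List.pairwise_cons.mp hl).1 c hc)
    simp only [mergeCnt, if_neg hab]
    refine ⟨?_, ?_, ?_⟩
    · have hcount : (a :: l).countP (fun c => decide (b < c)) = (a :: l).length := by
        rw [List.countP_eq_length]
        intro c hc
        simpa using hgt c hc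
      rw [crossCnt_cons_right, h1, hcount]
      simp only [List.length_cons]
      omega
    · refine List.pairwise_cons.mpr ⟨fun c hc => ?_, h2⟩
      rcases List.mem_append.mp (h3.subset hc) with hcl | hcr
      · exact (hgt c hcl).le
      · exact (List.pairwise_cons.mp hr).1 c hcr
    · exact (h3.cons b).trans List.perm_middle.symm

theorem sortCnt_eq (x : List Int) (h : ¬ x.length < 2) :
    sortCnt x = ((sortCnt (x.take (x.length / 2))).1 + (sortCnt (x.drop (x.length / 2))).1 +
        (mergeCnt (sortCnt (x.take (x.length / 2))).2 (sortCnt (x.drop (x.length / 2))).2).1,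
      (mergeCnt (sortCnt (x.take (x.length / 2))).2 (sortCnt (x.drop (x.length / 2))).2).2) := by
  rw [sortCnt, dif_neg h]

theorem sortCnt_spec_aux : ∀ (n : Nat) (x : List Int), x.length ≤ n →
    (sortCnt x).1 = invCnt x ∧ (sortCnt x).2.Pairwise (· ≤ ·) ∧ (sortCnt x).2.Perm x := by
  intro n
  induction n with
  | zero =>
    intro x hx
    have hxe : x = [] := List.eq_nil_of_length_eq_zero (Nat.le_zero.mp hx)
    subst hxe
    rw [sortCnt]
    exact ⟨rfl, by simp, List.Perm.refl _⟩
  | succ n ih =>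
    intro x hx
    by_cases h : x.length < 2
    · rw [sortCnt, dif_pos h]
      match x, h with
      | [], _ => exact ⟨rfl, by simp, List.Perm.refl _⟩
      | [a], _ => exact ⟨by simp [invCnt], by simp, List.Perm.refl _⟩
    · have htake : (x.take (x.length / 2)).length ≤ n := by
        simp only [List.length_take]; omega
      have hdrop : (x.drop (x.length / 2)).length ≤ n := by
        simp only [List.length_drop]; omega
      obtain ⟨l1, l2, l3⟩ := ih _ htake
      obtain ⟨r1, r2, r3⟩ := ih _ hdrop
      obtain ⟨m1, m2, m3⟩ := mergeCnt_spec _ _ l2 r2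
      rw [sortCnt_eq x h]
      refine ⟨?_, m2, ?_⟩
      · have hxi := invCnt_append (x.take (x.length / 2)) (x.drop (x.length / 2))
        rw [List.take_append_drop] at hxi
        simp only [m1, l1, r1, crossCnt_perm_left _ l3, crossCnt_perm_right _ r3]
        omega
      · refine m3.trans ((l3.append r3).trans ?_)
        rw [List.take_append_drop]

theorem sortCnt_spec (x : List Int) :
    (sortCnt x).1 = invCnt x ∧ (sortCnt x).2.Pairwise (· ≤ ·) ∧ (sortCnt x).2.Perm x :=
  sortCnt_spec_aux x.length x le_rfl

theorem normalSwap_true : ∀ {x : List Int}, (normalSwap x).1 = true →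
    (normalSwap x).2 = x ∧ x.Pairwise (· ≤ ·) := by
  intro x
  induction x using normalSwap.induct with
  | case1 => intro _; exact ⟨rfl, by simp⟩
  | case2 a => intro _; exact ⟨rfl, by simp⟩
  | case3 a b t hba => intro h; simp [normalSwap, if_pos hba] at h
  | case4 a b t hba ih =>
    intro h
    simp only [normalSwap, if_neg hba] at h ⊢
    obtain ⟨he, hs⟩ := ih h
    refine ⟨by rw [he], ?_⟩
    refine List.pairwise_cons.mpr ⟨fun c hc => ?_, hs⟩
    have hab : a ≤ b := not_lt.mp hba
    rcases List.mem_cons.mp hc with rfl | hc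
    · exact hab
    · exact hab.trans ((List.pairwise_cons.mp hs).1 c hc)

theorem normalSwap_false : ∀ {x : List Int}, (normalSwap x).1 = false →
    (normalSwap x).2.Perm x ∧ invCnt (normalSwap x).2 + 1 = invCnt x := by
  intro x
  induction x using normalSwap.induct with
  | case1 => intro h; simp [normalSwap] at h
  | case2 a => intro h; simp [normalSwap] at h
  | case3 a b t hba =>
    intro _
    simp only [normalSwap, if_pos hba]
    refine ⟨List.Perm.swap a b t, ?_⟩
    have hab : ¬ a < b := not_lt.mpr hba.le
    have e1 : invCnt (b :: a :: t) = (a :: t).countP (fun c => decide (c < b)) +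
        (t.countP (fun c => decide (c < a)) + invCnt t) := rfl
    have e2 : invCnt (a :: b :: t) = (b :: t).countP (fun c => decide (c < a)) +
        (t.countP (fun c => decide (c < b)) + invCnt t) := rfl
    rw [e1, e2, List.countP_cons, List.countP_cons]
    simp [hba, hab]
    omega
  | case4 a b t hba ih =>
    intro h
    simp only [normalSwap, if_neg hba] at h ⊢
    obtain ⟨hp, hi⟩ := ih h
    refine ⟨hp.cons a, ?_⟩
    have hcp : (normalSwap (b :: t)).2.countP (fun c => decide (c < a)) =
        (b :: t).countP (fun c => decide (c < a)) := hp.countP_eq _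
    simp only [invCnt, hcp]
    simp only [invCnt] at hi
    omega

theorem invCnt_le (x : List Int) : invCnt x ≤ x.length * x.length := by
  induction x with
  | nil => simp [invCnt]
  | cons a l ih =>
    have hc : l.countP (fun b => decide (b < a)) ≤ l.length := List.countP_le_length
    simp only [invCnt, List.length_cons]
    nlinarith

theorem nsLoop_spec : ∀ (f : Nat) (s : Int) (x : List Int), invCnt x < f →
    (nsLoop f s x).1 = s * (-1) ^ (invCnt x + 1) ∧
      (nsLoop f s x).2.Perm x ∧ (nsLoop f s x).2.Pairwise (· ≤ ·) := by
  intro f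
  induction f with
  | zero => intro s x h; omega
  | succ f ih =>
    intro s x h
    cases hn : (normalSwap x).1 with
    | true =>
      obtain ⟨he, hs⟩ := normalSwap_true hn
      have hi : invCnt x = 0 := sorted_invCnt hs
      have hred : nsLoop (f + 1) s x = (-s, (normalSwap x).2) := by
        simp [nsLoop, hn]
      rw [hred, he, hi]
      exact ⟨by ring, List.Perm.refl _, hs⟩
    | false =>
      obtain ⟨hp, hi⟩ := normalSwap_false hn
      have hlt : invCnt (normalSwap x).2 < f := by omega
      obtain ⟨s1, s2, s3⟩ := ih (-s) (normalSwap x).2 hlt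
      have hred : nsLoop (f + 1) s x = nsLoop f (-s) (normalSwap x).2 := by
        simp [nsLoop, hn]
      rw [hred]
      refine ⟨?_, s2.trans hp, s3⟩
      rw [s1, ← hi]
      ring

-- ===== VERDICT (by name: the statement is the Claim_ definition above) =====
theorem get_normal_ordered_spec : Claim_equal_get_normal_ordered := by
  intro x _
  unfold Spec_get_normal_ordered get_normal_ordered get_normal_ordered_alt
  have hfuel : invCnt x < x.length * x.length + 1 := Nat.lt_succ_of_le (invCnt_le x)
  obtain ⟨hs, hperm, hsort⟩ := nsLoop_spec _ (-1) x hfuel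
  obtain ⟨hc, hsort', hperm'⟩ := sortCnt_spec x
  show nsLoop (x.length * x.length + 1) (-1) x =
    ((if (sortCnt x).1 % 2 == 0 then (1 : Int) else -1), (sortCnt x).2)
  have hlist : (nsLoop (x.length * x.length + 1) (-1) x).2 = (sortCnt x).2 :=
    (hperm.trans hperm'.symm).eq_of_pairwise (fun a b _ _ h1 h2 => le_antisymm h1 h2) hsort hsort'
  have hsign : (-1 : Int) * (-1) ^ (invCnt x + 1) =
      (if invCnt x % 2 == 0 then (1 : Int) else -1) := by
    rcases Nat.even_or_odd (invCnt x) with he | ho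
    · rw [pow_succ, he.neg_one_pow]
      simp [Nat.even_iff.mp he]
    · rw [pow_succ, ho.neg_one_pow]
      simp [Nat.odd_iff.mp ho]
  refine Prod.ext ?_ hlist
  rw [hs, hc]
  exact hsign
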